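-- pv_equiv track=rewrite | github.com/hexylena/scarf-generator | blocks.py | gen_petal
-- ===== SOURCE A (Python) =====
-- def gen_petal(petal_width, elongation, pointy=False):
--     temp_shape = []
--
--     for r in range(petal_width):
--         row = []
--         for c in range(petal_width):
--             row.append(c <= r)
--         temp_shape.append(row)
--
--     for r in range(elongation):
--         row = []
--         for c in range(petal_width):
--             row.append(True)
--         temp_shape.append(row)
--
--     for r in range(petal_width):
--         row = []
--         for c in range(petal_width):
--             row.append(c > r)
--         temp_shape.append(row)
--
--     if not pointy:
--         temp_shape[0][0] = False
--         temp_shape[1][0] = False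
--
--     return temp_shape
-- ===== SOURCE B (Python) =====
-- def gen_petal(petal_width, elongation, pointy=False):
--     # Build only the growing top triangle, one running row updated in place per step;
--     # the solid middle is replicated, and the bottom half is derived from the top by
--     # elementwise negation instead of being recomputed.
--     top = []
--     row = [False] * petal_width
--     for r in range(petal_width):
--         row = row.copy()
--         row[r] = True
--         top.append(row)
--     middle = [[True] * petal_width for _ in range(elongation)]
--     bottom = [[not v for v in t] for t in top]
--     shape = top + middle + bottom
--     if not pointy:
--         shape[0][0] = False
--         shape[1][0] = False
--     return shape
-- ===== Notes on version B (the rewrite author's own statement) =====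
-- stated objective: alternative
-- what changed: Instead of computing each of the three bands cell by cell, B maintains one running row, grows the top triangle by setting a single cell per step on a copy of the previous row, replicates the solid middle, and derives the whole bottom band from the top by elementwise negation.
import Mathlib
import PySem

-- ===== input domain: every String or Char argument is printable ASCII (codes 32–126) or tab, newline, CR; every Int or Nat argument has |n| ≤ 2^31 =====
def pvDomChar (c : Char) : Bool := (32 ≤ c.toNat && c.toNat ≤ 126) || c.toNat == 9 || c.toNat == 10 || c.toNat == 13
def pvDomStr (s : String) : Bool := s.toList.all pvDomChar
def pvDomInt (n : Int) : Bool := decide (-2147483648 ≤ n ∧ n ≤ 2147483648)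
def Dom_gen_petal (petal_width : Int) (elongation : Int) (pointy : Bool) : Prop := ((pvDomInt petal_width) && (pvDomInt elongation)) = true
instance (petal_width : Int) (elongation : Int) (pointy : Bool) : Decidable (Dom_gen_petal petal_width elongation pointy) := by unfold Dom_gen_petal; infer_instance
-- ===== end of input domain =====

-- B grows the top triangle by flipping one cell per step on a copy of a running row, replicates the
-- solid middle, and derives the bottom band by elementwise negation of the top (objective: alternative).

-- ===== PORT A =====
def gen_petal (petal_width : Int) (elongation : Int) (pointy : Bool) : List (List Bool) :=
  let t1 := (PySem.List.pyRange 0 petal_width 1).map (fun r =>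
    (PySem.List.pyRange 0 petal_width 1).map (fun c => decide (c ≤ r)))
  let t2 := (PySem.List.pyRange 0 elongation 1).map (fun _ =>
    (PySem.List.pyRange 0 petal_width 1).map (fun _ => true))
  let t3 := (PySem.List.pyRange 0 petal_width 1).map (fun r =>
    (PySem.List.pyRange 0 petal_width 1).map (fun c => decide (r < c)))
  let temp_shape := t1 ++ t2 ++ t3
  if pointy then temp_shape
  else -- temp_shape[0][0] = False; temp_shape[1][0] = False  (Pre_ guarantees the indices exist)
    (temp_shape.modify 0 (fun row => row.set 0 false)).modify 1 (fun row => row.set 0 false)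

-- ===== PORT B =====
def gen_petal_alt (petal_width : Int) (elongation : Int) (pointy : Bool) : List (List Bool) :=
  -- top: fold over range(petal_width) carrying (top so far, running row); row[r] = True on a copy
  -- (r is always a valid nonnegative index here, so List.set at r.toNat is exact)
  let init : List Bool := List.replicate petal_width.toNat false   -- [False] * petal_width
  let st := (PySem.List.pyRange 0 petal_width 1).foldl
    (fun (st : List (List Bool) × List Bool) r =>
      let row := st.2.set r.toNat true
      (st.1 ++ [row], row)) ([], init)
  let top := st.1
  -- the middle comprehension's body is constant, so it is el copies of [True] * petal_width
  let middle := List.replicate elongation.toNat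
    (List.replicate petal_width.toNat true)
  let bottom := top.map (fun t => t.map (fun v => !v))
  let shape := top ++ middle ++ bottom
  if pointy then shape
  else -- shape[0][0] = False; shape[1][0] = False  (Pre_ guarantees the indices exist)
    (shape.modify 0 (fun row => row.set 0 false)).modify 1 (fun row => row.set 0 false)

-- ===== PRECONDITION & SPEC =====
-- Pre_ excludes exactly the inputs (petal_width ≤ 0 with pointy=False) on which both Pythons
-- raise IndexError in the final fixup; it excludes no input on which A returns.
def Pre_gen_petal (petal_width : Int) (elongation : Int) (pointy : Bool) : Prop :=
  pointy = true ∨ 1 ≤ petal_width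
instance (petal_width : Int) (elongation : Int) (pointy : Bool) : Decidable (Pre_gen_petal petal_width elongation pointy) := by unfold Pre_gen_petal; infer_instance
def pvWitness_gen_petal : Int × Int × Bool := (2, 1, false)

def Spec_gen_petal (petal_width : Int) (elongation : Int) (pointy : Bool) (out : List (List Bool)) : Prop := out = gen_petal_alt petal_width elongation pointy
instance (petal_width : Int) (elongation : Int) (pointy : Bool) (out : List (List Bool)) : Decidable (Spec_gen_petal petal_width elongation pointy out) := by unfold Spec_gen_petal; infer_instance

-- ===== CLAIM (what is proved, stated in full; the proofs are below) =====
def Claim_equal_gen_petal : Prop := ∀ (petal_width : Int) (elongation : Int) (pointy : Bool), Dom_gen_petal petal_width elongation pointy → Pre_gen_petal petal_width elongation pointy → Spec_gen_petal petal_width elongation pointy (gen_petal petal_width elongation pointy)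

-- ===== LEMMAS AND PROOFS =====

-- the row with entries c < k, of length n
def pvRow (n k : Nat) : List Bool := (List.range n).map (fun c => decide (c < k))

theorem pvRow_zero (n : Nat) : List.replicate n false = pvRow n 0 := by
  unfold pvRow
  apply List.ext_getElem <;> simp

theorem pvRow_set (n k : Nat) (hk : k < n) : (pvRow n k).set k true = pvRow n (k + 1) := by
  unfold pvRow
  apply List.ext_getElem
  · simp
  · intro i h1 h2
    simp only [List.length_set, List.length_map, List.length_range] at h1
    rw [List.getElem_set]
    by_cases hik : k = i
    · subst hik
      simp
    · simp only [if_neg hik, List.getElem_map, List.getElem_range, decide_eq_decide]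
      omega

-- fold invariant: after k steps the accumulator holds rows pvRow n 1 … pvRow n k and the
-- running row is pvRow n k
theorem pv_fold_inv (n k : Nat) (hk : k ≤ n) :
    ((List.range k).map (fun (j : Nat) => (j : Int))).foldl
      (fun (st : List (List Bool) × List Bool) r =>
        (st.1 ++ [st.2.set r.toNat true], st.2.set r.toNat true)) ([], pvRow n 0)
    = ((List.range k).map (fun j => pvRow n (j + 1)), pvRow n k) := by
  induction k with
  | zero => simp
  | succ m ih =>
    rw [List.range_succ, List.map_append, List.foldl_append, ih (by omega),
        List.map_append]
    simp only [List.map_cons, List.map_nil, List.foldl_cons, List.foldl_nil, Int.toNat_natCast]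
    rw [pvRow_set n m (by omega)]

-- B's top band equals A's first band
theorem pv_top_eq (p : Int) :
    ((PySem.List.pyRange 0 p 1).foldl
      (fun (st : List (List Bool) × List Bool) r =>
        (st.1 ++ [st.2.set r.toNat true], st.2.set r.toNat true)) ([], List.replicate p.toNat false)).1
    = (PySem.List.pyRange 0 p 1).map (fun r =>
        (PySem.List.pyRange 0 p 1).map (fun c => decide (c ≤ r))) := by
  have hl : PySem.List.pyRange 0 p 1 = (List.range p.toNat).map (fun (j : Nat) => (j : Int)) := by
    rw [PySem.List.pyRange_one 0 p]
    simp only [Int.sub_zero, zero_add]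
  rw [hl, pvRow_zero p.toNat, pv_fold_inv p.toNat p.toNat le_rfl]
  dsimp only
  rw [List.map_map]
  apply List.map_congr_left
  intro j hj
  simp only [Function.comp_apply]
  unfold pvRow
  rw [List.map_map]
  apply List.map_congr_left
  intro c _
  simp only [Function.comp_apply, decide_eq_decide]
  omega

-- B's middle band equals A's second band
theorem pv_mid_eq (p e : Int) :
    List.replicate e.toNat (List.replicate p.toNat true)
    = (PySem.List.pyRange 0 e 1).map (fun _ =>
        (PySem.List.pyRange 0 p 1).map (fun _ => true)) := by
  rw [List.map_const', PySem.List.length_pyRange_one]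
  have h1 : (e - 0).toNat = e.toNat := by omega
  rw [h1]
  congr 1
  rw [List.map_const', PySem.List.length_pyRange_one]
  have h2 : (p - 0).toNat = p.toNat := by omega
  rw [h2]

-- negating A's first band gives A's third band
theorem pv_bot_eq (p : Int) :
    ((PySem.List.pyRange 0 p 1).map (fun r =>
        (PySem.List.pyRange 0 p 1).map (fun c => decide (c ≤ r)))).map
      (fun t => t.map (fun v => !v))
    = (PySem.List.pyRange 0 p 1).map (fun r =>
        (PySem.List.pyRange 0 p 1).map (fun c => decide (r < c))) := by
  rw [List.map_map]
  apply List.map_congr_left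
  intro r _
  simp only [Function.comp_apply, List.map_map]
  apply List.map_congr_left
  intro c _
  simp only [Function.comp_apply]
  by_cases h : c ≤ r <;> simp [h] <;> omega

-- the ports are equal on every input (the fixup is identical and total in Lean)
theorem pv_ports_eq (p e : Int) (pt : Bool) : gen_petal p e pt = gen_petal_alt p e pt := by
  unfold gen_petal gen_petal_alt
  simp only [pv_top_eq p, pv_mid_eq p e, pv_bot_eq p]

-- ===== VERDICT (by name: the statement is the Claim_ definition above) =====
theorem gen_petal_spec : Claim_equal_gen_petal := by
  intro p e pt _ _
  unfold Spec_gen_petal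
  exact pv_ports_eq p e pt
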